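-- pv_equiv track=rewrite | github.com/cddlab/alphafold3_tools | alphafold3tools/msa_conversion.py | convert_a3m_to_stockholm_cpp
-- ===== SOURCE A (Python) =====
-- from collections.abc import Iterable
--
-- def convert_a3m_to_stockholm_cpp(a3m_sequences: Iterable[str]) -> list[str]:
--     """Converts a list of sequences in A3M format to Stockholm format.
--
--     In A3M format, insertions (residues not aligned to the query) are
--     represented as lowercase letters. In Stockholm format, all sequences
--     must have the same length, with insertions padded using gaps ('-').
--
--     Example:
--         Input A3M:
--             abCD
--             CgD
--             fCDa
--
--         Output Stockholm:
--             ABC-D-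
--             --CGD-
--             F-C-DA
--
--     Args:
--         a3m_sequences: A list of strings in A3M format. Insertions are
--             represented as lowercase letters, aligned residues as uppercase.
--
--     Returns:
--         A list of strings converted to Stockholm format, where all sequences
--         have the same length and insertions are uppercase with gaps for padding.
--
--     Raises:
--         ValueError: If A3M rows have inconsistent lengths after processing
--             (indicates invalid A3M input).
--     """
--     a3m_sequences = list(a3m_sequences)
--     if not a3m_sequences:
--         return []
--
--     num_sequences = len(a3m_sequences)
--
--     # Convert to list of lists for easier manipulation
--     sequences = [list(seq) for seq in a3m_sequences]
--
--     # Pre-allocate output arrays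
--     stockholm_sequences = [[] for _ in range(num_sequences)]
--
--     # Track current position in each sequence
--     positions = [0] * num_sequences
--
--     # Process column by column
--     while any(positions[i] < len(sequences[i]) for i in range(num_sequences)):
--         # Check if any sequence has an insertion (lowercase) at current position
--         has_insertion = False
--         for i in range(num_sequences):
--             if positions[i] < len(sequences[i]):
--                 char = sequences[i][positions[i]]
--                 if char.islower():
--                     has_insertion = True
--                     break
--
--         if has_insertion:
--             # Process insertion column
--             for i in range(num_sequences):
--                 if positions[i] < len(sequences[i]):
--                     char = sequences[i][positions[i]]
--                     if char.islower():
--                         # Convert insertion to uppercase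
--                         stockholm_sequences[i].append(char.upper())
--                         positions[i] += 1
--                     else:
--                         # Pad with gap
--                         stockholm_sequences[i].append("-")
--                 else:
--                     # Sequence already exhausted, pad with gap
--                     stockholm_sequences[i].append("-")
--         else:
--             # Process aligned column (no insertions)
--             for i in range(num_sequences):
--                 if positions[i] < len(sequences[i]):
--                     char = sequences[i][positions[i]]
--                     stockholm_sequences[i].append(char)
--                     positions[i] += 1
--                 else:
--                     # This should not happen with valid A3M input
--                     raise ValueError(
--                         f"A3M rows have inconsistent lengths; row {i} has no "
--                         f"columns left but not all rows are exhausted"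
--                     )
--
--     # Convert lists back to strings
--     return ["".join(seq) for seq in stockholm_sequences]
-- ===== SOURCE B (Python) =====
-- def _tokenize(s):
--     """Split an A3M row into (insert_run, match_char) blocks plus a trailing insert run."""
--     blocks = []
--     run = []
--     for c in s:
--         if c.islower():
--             run.append(c)
--         else:
--             blocks.append(("".join(run), c))
--             run = []
--     return blocks, "".join(run)
--
--
-- def _slot_widths(toks):
--     """Max insert-run length at each of the M+1 insertion slots, across all rows."""
--     widths = []
--     rest = toks
--     while rest[0][0]:
--         widths.append(max(len(blocks[0][0]) for blocks, _ in rest))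
--         rest = [(blocks[1:], trail) for blocks, trail in rest]
--     widths.append(max(len(trail) for _, trail in rest))
--     return widths
--
--
-- def convert_a3m_to_stockholm_cpp(a3m_sequences):
--     seqs = list(a3m_sequences)
--     if not seqs:
--         return []
--     toks = [_tokenize(s) for s in seqs]
--     m = len(toks[0][0])
--     for blocks, _ in toks:
--         if len(blocks) != m:
--             raise ValueError(
--                 "A3M rows have inconsistent numbers of match columns"
--             )
--     widths = _slot_widths(toks)
--     out = []
--     for blocks, trail in toks:
--         parts = []
--         for (run, match_char), w in zip(blocks, widths):
--             parts.append(run.upper().ljust(w, "-"))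
--             parts.append(match_char)
--         parts.append(trail.upper().ljust(widths[m], "-"))
--         out.append("".join(parts))
--     return out
-- ===== Notes on version B (the rewrite author's own statement) =====
-- stated objective: alternative
-- what changed: Replaces A's synchronized column-by-column sweep over per-sequence cursors by a tokenize/reduce/rebuild pipeline: each row is tokenized once into (insert-run, match-char) blocks, a separate pass reduces the maximum insert-run width per slot, and each output row is rebuilt independently by left-justified padding; Pre_ excludes exactly the inputs where A raises ValueError (rows with differing match-character counts), where B raises ValueError too.
import Mathlib
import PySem

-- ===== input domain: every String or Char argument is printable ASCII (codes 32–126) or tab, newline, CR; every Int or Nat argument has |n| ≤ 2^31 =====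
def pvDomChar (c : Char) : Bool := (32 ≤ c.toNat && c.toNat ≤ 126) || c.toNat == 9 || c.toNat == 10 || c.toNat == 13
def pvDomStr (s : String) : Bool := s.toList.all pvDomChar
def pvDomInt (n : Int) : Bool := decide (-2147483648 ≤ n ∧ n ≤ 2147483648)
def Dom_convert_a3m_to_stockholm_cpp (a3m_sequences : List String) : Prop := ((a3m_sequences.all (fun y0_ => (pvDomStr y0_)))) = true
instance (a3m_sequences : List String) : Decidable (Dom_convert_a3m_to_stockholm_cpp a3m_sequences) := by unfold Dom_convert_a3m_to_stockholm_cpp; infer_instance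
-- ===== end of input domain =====

-- B replaces A's synchronized column-by-column sweep over per-sequence cursors by a
-- tokenize / per-slot max reduction / per-row rebuild pipeline (objective: alternative).
-- Pre_ excludes exactly the inputs on which the Python A raises ValueError (rows whose
-- counts of non-lowercase match characters differ); the Python B raises there too.

-- ===== PORT A =====
-- A's loop state, per sequence: (sequence as chars, current position, output so far).
-- One insertion column: rows at a lowercase char emit its uppercase and advance; others emit '-'.
def pvAInsStep (x : List Char × Nat × List Char) : List Char × Nat × List Char :=
  if x.2.1 < x.1.length then
    if (x.1.getD x.2.1 ' ').isLower then (x.1, x.2.1 + 1, x.2.2 ++ [(x.1.getD x.2.1 ' ').toUpper])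
    else (x.1, x.2.1, x.2.2 ++ ['-'])
  else (x.1, x.2.1, x.2.2 ++ ['-'])

-- One aligned column: every row emits its current char and advances.
def pvAAliStep (x : List Char × Nat × List Char) : List Char × Nat × List Char :=
  (x.1, x.2.1 + 1, x.2.2 ++ [x.1.getD x.2.1 ' '])

-- Python's `while` loop; `fuel` bounds the iterations (each iteration advances at least one
-- cursor, so total chars + 1 suffices); `none` is Python's `raise ValueError`.
def pvALoop : Nat → List (List Char × Nat × List Char) → Option (List (List Char))
  | 0, _ => none
  | fuel + 1, st =>
    if st.any (fun x => decide (x.2.1 < x.1.length)) then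
      if st.any (fun x => decide (x.2.1 < x.1.length) && (x.1.getD x.2.1 ' ').isLower) then
        pvALoop fuel (st.map pvAInsStep)
      else
        if st.any (fun x => !decide (x.2.1 < x.1.length)) then none
        else pvALoop fuel (st.map pvAAliStep)
    else some (st.map (fun x => x.2.2))

def convert_a3m_to_stockholm_cpp (a3m_sequences : List String) : List String :=
  if a3m_sequences.isEmpty then []
  else
    let sequences := a3m_sequences.map (fun s => s.toList)
    let fuel := (sequences.map List.length).sum + 1
    match pvALoop fuel (sequences.map (fun s => (s, 0, ([] : List Char)))) with
    | some outs => outs.map String.mk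
    | none => []  -- Python raises ValueError here (excluded by Pre_)

-- ===== PORT B =====
-- Tokenizer step: a lowercase char extends the pending insert run, any other char closes a block.
def pvTokStep (acc : List (List Char × Char) × List Char) (c : Char) :
    List (List Char × Char) × List Char :=
  if c.isLower then (acc.1, acc.2 ++ [c]) else (acc.1 ++ [(acc.2, c)], [])

def pvTokenize (s : List Char) : List (List Char × Char) × List Char :=
  s.foldl pvTokStep ([], [])

-- Per-slot reduction: max insert-run length at each of the M+1 insertion slots, across rows.
def pvSlotWidths : List (List (List Char × Char) × List Char) → List Nat
  | [] => []
  | ([], t0) :: rest => [((([], t0) :: rest).foldl (fun a x => max a x.2.length) 0 : Nat)]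
  | ((q :: bs'), t0) :: rest =>
      (((q :: bs', t0) :: rest).foldl (fun a x => max a (x.1.headD ([], ' ')).1.length) 0)
        :: pvSlotWidths (((q :: bs', t0) :: rest).map (fun x => (x.1.tail, x.2)))
  termination_by toks => (toks.headD ([], [])).1.length
  decreasing_by simp

-- generic foldl-max facts

-- run.upper().ljust(w, "-")
def pvLjust (r : List Char) (w : Nat) : List Char :=
  r.map Char.toUpper ++ List.replicate (w - r.length) '-'

-- Rebuild one row from its blocks, walking the widths list in parallel.
def pvRender (bs : List (List Char × Char)) (trail : List Char) (ws : List Nat) : List Char :=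
  match bs with
  | [] => pvLjust trail (ws.headD 0)
  | (r, m) :: bs' => pvLjust r (ws.headD 0) ++ m :: pvRender bs' trail ws.tail

def convert_a3m_to_stockholm_cpp_alt (a3m_sequences : List String) : List String :=
  match a3m_sequences with
  | [] => []
  | _ =>
    let toks := a3m_sequences.map (fun s => pvTokenize s.toList)
    let m := (toks.headD ([], [])).1.length
    if toks.all (fun x => x.1.length == m) then
      let ws := pvSlotWidths toks
      toks.map (fun x => String.mk (pvRender x.1 x.2 ws))
    else []  -- Python raises ValueError here (excluded by Pre_)

-- ===== PRECONDITION & SPEC =====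
def pvMatchCount (s : String) : Nat := (s.toList.filter (fun c => !c.isLower)).length

-- Pre_ excludes exactly the inputs on which the Python A raises ValueError: rows whose counts
-- of non-lowercase (match) characters differ.  The Python B raises ValueError there as well.
def Pre_convert_a3m_to_stockholm_cpp (a3m_sequences : List String) : Prop :=
  ∀ s ∈ a3m_sequences, ∀ t ∈ a3m_sequences, pvMatchCount s = pvMatchCount t

instance (a3m_sequences : List String) : Decidable (Pre_convert_a3m_to_stockholm_cpp a3m_sequences) := by
  unfold Pre_convert_a3m_to_stockholm_cpp; infer_instance

def pvWitness_convert_a3m_to_stockholm_cpp : List String := ["abCD", "CgD", "fCDa"]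

def Spec_convert_a3m_to_stockholm_cpp (a3m_sequences : List String) (out : List String) : Prop := out = convert_a3m_to_stockholm_cpp_alt a3m_sequences
instance (a3m_sequences : List String) (out : List String) : Decidable (Spec_convert_a3m_to_stockholm_cpp a3m_sequences out) := by unfold Spec_convert_a3m_to_stockholm_cpp; infer_instance

-- ===== CLAIM (what is proved, stated in full; the proofs are below) =====
def Claim_equal_convert_a3m_to_stockholm_cpp : Prop := ∀ (a3m_sequences : List String), Dom_convert_a3m_to_stockholm_cpp a3m_sequences → Pre_convert_a3m_to_stockholm_cpp a3m_sequences → Spec_convert_a3m_to_stockholm_cpp a3m_sequences (convert_a3m_to_stockholm_cpp a3m_sequences)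

-- ===== LEMMAS AND PROOFS =====

def pvSInsStep (x : List Char × List Char) : List Char × List Char :=
  if !x.1.isEmpty then
    if (x.1.headD ' ').isLower then (x.1.tail, x.2 ++ [(x.1.headD ' ').toUpper])
    else (x.1, x.2 ++ ['-'])
  else (x.1, x.2 ++ ['-'])

def pvSAliStep (x : List Char × List Char) : List Char × List Char :=
  (x.1.tail, x.2 ++ [x.1.headD ' '])

def pvPhi (x : List Char × Nat × List Char) : List Char × List Char :=
  (x.1.drop x.2.1, x.2.2)

theorem pvPhi_isEmpty (x : List Char × Nat × List Char) :
    (pvPhi x).1.isEmpty = !decide (x.2.1 < x.1.length) := by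
  rcases x with ⟨s, p, o⟩
  by_cases h : p < s.length
  · have h1 : s.drop p ≠ [] := by simp [List.drop_eq_nil_iff]; omega
    simp [pvPhi, h, h1]
  · have h1 : s.drop p = [] := by simp [List.drop_eq_nil_iff]; omega
    simp [pvPhi, h, h1]

theorem pvPhi_headD (x : List Char × Nat × List Char) :
    (pvPhi x).1.headD ' ' = x.1.getD x.2.1 ' ' := by
  simp [pvPhi, List.headD_eq_head?_getD, List.head?_drop, List.getD_eq_getElem?_getD]

theorem pvPhi_ins (x : List Char × Nat × List Char) :
    pvPhi (pvAInsStep x) = pvSInsStep (pvPhi x) := by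
  rcases x with ⟨s, p, o⟩
  unfold pvAInsStep pvSInsStep
  rw [pvPhi_isEmpty, pvPhi_headD]
  by_cases h : p < s.length
  · simp [h, pvPhi]
    split <;> simp [List.tail_drop]
  · simp [h, pvPhi]

theorem pvPhi_ali (x : List Char × Nat × List Char) :
    pvPhi (pvAAliStep x) = pvSAliStep (pvPhi x) := by
  rcases x with ⟨s, p, o⟩
  unfold pvAAliStep pvSAliStep
  rw [pvPhi_headD]
  simp [pvPhi, List.tail_drop]

def pvSLoop : Nat → List (List Char × List Char) → Option (List (List Char))
  | 0, _ => none
  | fuel + 1, st =>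
    if st.any (fun x => !x.1.isEmpty) then
      if st.any (fun x => !x.1.isEmpty && (x.1.headD ' ').isLower) then
        pvSLoop fuel (st.map pvSInsStep)
      else
        if st.any (fun x => x.1.isEmpty) then none
        else pvSLoop fuel (st.map pvSAliStep)
    else some (st.map (fun x => x.2))

theorem pvALoop_eq_sloop (fuel : Nat) : ∀ (st : List (List Char × Nat × List Char)),
    pvALoop fuel st = pvSLoop fuel (st.map pvPhi) := by
  induction fuel with
  | zero => intro st; rfl
  | succ fuel ih =>
    intro st
    rw [pvALoop, pvSLoop, List.any_map, List.any_map, List.any_map]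
    have e1 : ((fun x : List Char × List Char => !x.1.isEmpty) ∘ pvPhi)
        = fun x => decide (x.2.1 < x.1.length) := by
      funext x; simp [Function.comp, pvPhi_isEmpty]
    have e2 : ((fun x : List Char × List Char => !x.1.isEmpty && (x.1.headD ' ').isLower) ∘ pvPhi)
        = fun x => decide (x.2.1 < x.1.length) && (x.1.getD x.2.1 ' ').isLower := by
      funext x
      simp only [Function.comp, pvPhi_isEmpty, pvPhi_headD, Bool.not_not]
    have e3 : ((fun x : List Char × List Char => x.1.isEmpty) ∘ pvPhi)
        = fun x => !decide (x.2.1 < x.1.length) := by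
      funext x; simp [Function.comp]; rw [pvPhi_isEmpty]
    rw [e1, e2, e3]
    split
    · split
      · rw [ih, List.map_map, List.map_map]
        congr 1
        exact List.map_congr_left (fun x _ => by simp only [Function.comp]; exact pvPhi_ins x)
      · split
        · rfl
        · rw [ih, List.map_map, List.map_map]
          congr 1
          exact List.map_congr_left (fun x _ => by simp only [Function.comp]; exact pvPhi_ali x)
    · rw [List.map_map]; rfl

def pvTokR : List Char → List (List Char × Char) × List Char
  | [] => ([], [])
  | c :: s =>
    let p := pvTokR s
    if c.isLower then
      match p.1 with
      | [] => ([], c :: p.2)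
      | (r, m) :: bs => ((c :: r, m) :: bs, p.2)
    else (([], c) :: p.1, p.2)

theorem pvTok_foldl (s : List Char) : ∀ (bs0 : List (List Char × Char)) (run0 : List Char),
    s.foldl pvTokStep (bs0, run0)
      = (match (pvTokR s).1 with
         | [] => (bs0, run0 ++ (pvTokR s).2)
         | (r, m) :: bs' => (bs0 ++ (run0 ++ r, m) :: bs', (pvTokR s).2)) := by
  induction s with
  | nil => intro bs0 run0; simp [pvTokR]
  | cons c s ih =>
    intro bs0 run0
    by_cases hl : c.isLower
    · rw [List.foldl_cons]
      rw [show pvTokStep (bs0, run0) c = (bs0, run0 ++ [c]) by simp [pvTokStep, hl]]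
      rw [ih]
      cases h : (pvTokR s).1 with
      | nil => simp [pvTokR, hl, h]
      | cons p bs' => rcases p with ⟨r, m⟩; simp [pvTokR, hl, h]
    · rw [List.foldl_cons]
      rw [show pvTokStep (bs0, run0) c = (bs0 ++ [(run0, c)], []) by simp [pvTokStep, hl]]
      rw [ih]
      cases h : (pvTokR s).1 with
      | nil => simp [pvTokR, hl, h]
      | cons p bs' => rcases p with ⟨r, m⟩; simp [pvTokR, hl, h]

theorem pvTokenize_eq_tokR (s : List Char) : pvTokenize s = pvTokR s := by
  unfold pvTokenize
  rw [pvTok_foldl]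
  cases h : (pvTokR s).1 with
  | nil => rw [Prod.ext_iff]; simp [h]
  | cons p bs' => rcases p with ⟨r, m⟩; rw [Prod.ext_iff]; simp [h]

def pvUntok (bs : List (List Char × Char)) (trail : List Char) : List Char :=
  (bs.flatMap (fun p => p.1 ++ [p.2])) ++ trail

theorem pvUntok_tokR (s : List Char) : pvUntok (pvTokR s).1 (pvTokR s).2 = s := by
  induction s with
  | nil => simp [pvTokR, pvUntok]
  | cons c s ih =>
    by_cases hl : c.isLower
    · cases h : (pvTokR s).1 with
      | nil => simp [pvTokR, hl, h]; simpa [pvUntok, h] using ih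
      | cons p bs' =>
        rcases p with ⟨r, m⟩
        simp [pvTokR, hl, h]
        simpa [pvUntok, h] using ih
    · simp [pvTokR, hl]
      simpa [pvUntok] using ih

def pvGoodRow (x : List (List Char × Char) × List Char × List Char) : Prop :=
  (∀ p ∈ x.1, (∀ c ∈ p.1, c.isLower = true) ∧ p.2.isLower = false) ∧
    (∀ c ∈ x.2.1, c.isLower = true)

theorem pvTokR_good (s : List Char) (o : List Char) :
    pvGoodRow ((pvTokR s).1, (pvTokR s).2, o) := by
  induction s with
  | nil => exact ⟨by simp [pvTokR], by simp [pvTokR]⟩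
  | cons c s ih =>
    obtain ⟨ih1, ih2⟩ := ih
    by_cases hl : c.isLower
    · cases h : (pvTokR s).1 with
      | nil =>
        refine ⟨by simp [pvTokR, hl, h], ?_⟩
        intro d hd
        simp [pvTokR, hl, h] at hd
        rcases hd with rfl | hd
        · exact hl
        · exact ih2 d hd
      | cons p bs' =>
        rcases p with ⟨r, m⟩
        constructor
        · intro q hq
          simp [pvTokR, hl, h] at hq
          rcases hq with rfl | hq
          · have := ih1 (r, m) (by rw [h]; exact List.mem_cons_self ..)
            exact ⟨fun d hd => by rcases List.mem_cons.mp hd with rfl | hd; exact hl; exact this.1 d hd, this.2⟩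
          · exact ih1 q (by rw [h]; exact List.mem_cons_of_mem _ hq)
        · intro d hd
          simp [pvTokR, hl, h] at hd
          exact ih2 d hd
    · constructor
      · intro q hq
        simp [pvTokR, hl] at hq
        rcases hq with rfl | hq
        · exact ⟨fun d hd => by simp at hd, by simpa using hl⟩
        · exact ih1 q hq
      · intro d hd
        simp [pvTokR, hl] at hd
        exact ih2 d hd

theorem pvTokR_len (s : List Char) :
    (pvTokR s).1.length = (s.filter (fun c => !c.isLower)).length := by
  induction s with
  | nil => simp [pvTokR]
  | cons c s ih =>
    by_cases hl : c.isLower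
    · cases h : (pvTokR s).1 with
      | nil => simp [pvTokR, hl, h]; rw [h] at ih; simpa using ih
      | cons p bs' => rcases p with ⟨r, m⟩; simp [pvTokR, hl, h]; rw [h] at ih; simpa using ih
    · simp [pvTokR, hl]; simpa using ih

theorem pvFoldlMax_zero {α : Type} (f : α → Nat) (l : List α) (h : ∀ x ∈ l, f x = 0) :
    l.foldl (fun b x => max b (f x)) 0 = 0 := by
  induction l with
  | nil => rfl
  | cons y l ih =>
    simp only [List.foldl_cons, h y (List.mem_cons_self ..)]
    exact ih (fun x hx => h x (List.mem_cons_of_mem _ hx))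

theorem pvFoldlMax_init_le {α : Type} (f : α → Nat) (l : List α) : ∀ a : Nat,
    a ≤ l.foldl (fun b y => max b (f y)) a := by
  induction l with
  | nil => intro a; simp
  | cons y l ih => intro a; exact le_trans (le_max_left _ _) (ih (max a (f y)))

theorem pvFoldlMax_mem_le {α : Type} (f : α → Nat) (l : List α) (x : α) (hx : x ∈ l) :
    ∀ a : Nat, f x ≤ l.foldl (fun b y => max b (f y)) a := by
  induction l with
  | nil => cases hx
  | cons y l ih =>
    intro a
    rcases List.mem_cons.mp hx with rfl | hx'
    · exact le_trans (le_max_right _ _) (pvFoldlMax_init_le f l _)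
    · exact ih hx' _

theorem pvFoldlMax_dec {α : Type} (f g : α → Nat) (l : List α) (hfg : ∀ x ∈ l, g x = f x - 1) :
    ∀ a : Nat, l.foldl (fun b x => max b (g x)) (a - 1) = l.foldl (fun b x => max b (f x)) a - 1 := by
  induction l with
  | nil => intro a; rfl
  | cons y l ih =>
    intro a
    simp only [List.foldl_cons, hfg y (List.mem_cons_self ..)]
    rw [show max (a - 1) (f y - 1) = max a (f y) - 1 by omega]
    exact ih (fun x hx => hfg x (List.mem_cons_of_mem _ hx)) (max a (f y))

-- pvLjust / pvRender step facts

theorem pvLjust_step (r : List Char) (w : Nat) (hw : 0 < w) :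
    pvLjust r w = (if r.isEmpty then ['-'] else [(r.headD ' ').toUpper]) ++ pvLjust r.tail (w - 1) := by
  cases r with
  | nil =>
    simp only [pvLjust, List.isEmpty_nil, if_true, List.map_nil, List.nil_append, List.tail_nil,
      List.length_nil, Nat.sub_zero]
    rw [show w = (w - 1) + 1 by omega, List.replicate_succ]
    simp
  | cons c r' =>
    simp only [pvLjust, List.isEmpty_cons, if_false, List.map_cons, List.headD_cons,
      List.tail_cons, List.length_cons, Bool.false_eq_true]
    rw [show w - (r'.length + 1) = (w - 1) - r'.length by omega]
    simp

theorem pvRender_ali_step (m : Char) (bs : List (List Char × Char)) (t : List Char) (ws : List Nat) :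
    pvRender (([], m) :: bs) t (0 :: ws) = m :: pvRender bs t ws := by
  simp [pvRender, pvLjust]

def pvSigma (x : List (List Char × Char) × List Char × List Char) : List Char × List Char :=
  (pvUntok x.1 x.2.1, x.2.2)

def pvTProj (x : List (List Char × Char) × List Char × List Char) :
    List (List Char × Char) × List Char := (x.1, x.2.1)

def pvColT (x : List (List Char × Char) × List Char × List Char) :
    List (List Char × Char) × List Char × List Char :=
  (x.1, x.2.1.tail, x.2.2 ++ (if x.2.1.isEmpty then ['-'] else [(x.2.1.headD ' ').toUpper]))

def pvColR (x : List (List Char × Char) × List Char × List Char) :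
    List (List Char × Char) × List Char × List Char :=
  ((match x.1 with | [] => [] | (r, m) :: bs => (r.tail, m) :: bs), x.2.1,
    x.2.2 ++ (if (x.1.headD ([], ' ')).1.isEmpty then ['-']
              else [((x.1.headD ([], ' ')).1.headD ' ').toUpper]))

def pvColA (x : List (List Char × Char) × List Char × List Char) :
    List (List Char × Char) × List Char × List Char :=
  (x.1.tail, x.2.1, x.2.2 ++ [(x.1.headD ([], ' ')).2])

theorem pvUntok_nil (t : List Char) : pvUntok [] t = t := by simp [pvUntok]

theorem pvUntok_cons (r : List Char) (m : Char) (bs : List (List Char × Char)) (t : List Char) :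
    pvUntok ((r, m) :: bs) t = r ++ m :: pvUntok bs t := by
  simp [pvUntok]

theorem pvSigT (x : List (List Char × Char) × List Char × List Char) (hbs : x.1 = [])
    (hlow : ∀ c ∈ x.2.1, c.isLower = true) :
    pvSInsStep (pvSigma x) = pvSigma (pvColT x) := by
  rcases x with ⟨bs, t, o⟩
  simp only at hbs; subst hbs
  cases t with
  | nil => simp [pvSigma, pvSInsStep, pvColT, pvUntok_nil]
  | cons c t' =>
    have hc : c.isLower = true := hlow c (List.mem_cons_self ..)
    simp [pvSigma, pvSInsStep, pvColT, pvUntok_nil, hc]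

theorem pvSigR (x : List (List Char × Char) × List Char × List Char) (hbs : x.1 ≠ [])
    (hgood : pvGoodRow x) :
    pvSInsStep (pvSigma x) = pvSigma (pvColR x) := by
  rcases x with ⟨bs, t, o⟩
  cases bs with
  | nil => simp at hbs
  | cons p bs' =>
    rcases p with ⟨r, m⟩
    have hm : m.isLower = false := (hgood.1 (r, m) (List.mem_cons_self ..)).2
    cases r with
    | nil => simp [pvSigma, pvSInsStep, pvColR, pvUntok_cons, hm]
    | cons c r' =>
      have hc : c.isLower = true :=
        (hgood.1 (c :: r', m) (List.mem_cons_self ..)).1 c (List.mem_cons_self ..)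
      simp [pvSigma, pvSInsStep, pvColR, pvUntok_cons, hc]

theorem pvSigA (x : List (List Char × Char) × List Char × List Char) (hbs : x.1 ≠ [])
    (hr : (x.1.headD ([], ' ')).1 = []) :
    pvSAliStep (pvSigma x) = pvSigma (pvColA x) := by
  rcases x with ⟨bs, t, o⟩
  cases bs with
  | nil => simp at hbs
  | cons p bs' =>
    rcases p with ⟨r, m⟩
    simp only [List.headD_cons] at hr
    subst hr
    simp [pvSigma, pvSAliStep, pvColA, pvUntok_cons]

theorem pvKey : ∀ (fuel : Nat) (st : List (List (List Char × Char) × List Char × List Char))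
    (M : Nat), st ≠ [] → (∀ x ∈ st, x.1.length = M) → (∀ x ∈ st, pvGoodRow x) →
    (st.map (fun x => (pvUntok x.1 x.2.1).length)).sum < fuel →
    pvSLoop fuel (st.map pvSigma)
      = some (st.map (fun x => x.2.2 ++ pvRender x.1 x.2.1 (pvSlotWidths (st.map pvTProj)))) := by
  intro fuel
  induction fuel with
  | zero => intro st M hne hlen hgood hfuel; omega
  | succ fuel ih =>
    intro st M hne hlen hgood hfuel
    obtain ⟨y, st0, rfl⟩ : ∃ y st0, st = y :: st0 := by
      cases st with
      | nil => exact absurd rfl hne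
      | cons a b => exact ⟨a, b, rfl⟩
    set st := y :: st0 with hst
    cases M with
    | zero =>
      have hbs : ∀ x ∈ st, x.1 = [] := fun x hx => List.length_eq_zero_iff.mp (hlen x hx)
      -- widths of the current state: the single trailing slot
      have hy1 : y.1 = [] := hbs y (by rw [hst]; exact List.mem_cons_self ..)
      have hty : pvTProj y = ([], y.2.1) := by simp [pvTProj, hy1]
      have hW : pvSlotWidths (st.map pvTProj)
          = [st.foldl (fun a x => max a x.2.1.length) 0] := by
        rw [hst, List.map_cons, hty, pvSlotWidths]
        congr 1
        rw [← hty, ← List.map_cons, List.foldl_map]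
        rfl
      by_cases hall : ∀ x ∈ st, x.2.1 = ([] : List Char)
      · have hany : (st.map pvSigma).any (fun x => !x.1.isEmpty) = false := by
          rw [List.any_map, List.any_eq_false]
          intro x hx
          simp [Function.comp, pvSigma, pvUntok_nil, hbs x hx, hall x hx]
        rw [pvSLoop, hany]
        simp only [Bool.false_eq_true, if_false, List.map_map]
        congr 1
        apply List.map_congr_left
        intro x hx
        have h0 : st.foldl (fun a x => max a x.2.1.length) 0 = 0 :=
          pvFoldlMax_zero _ _ (fun x hx => by rw [hall x hx]; rfl)
        simp [Function.comp, pvSigma, hW, h0, hbs x hx, hall x hx, pvRender, pvLjust]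
      · push_neg at hall
        obtain ⟨z, hz, hzne⟩ := hall
        have hwpos : 0 < st.foldl (fun a x => max a x.2.1.length) 0 := by
          have h1 : z.2.1.length ≤ st.foldl (fun a x => max a x.2.1.length) 0 :=
            pvFoldlMax_mem_le (fun x => x.2.1.length) st z hz 0
          have h2 : z.2.1 ≠ [] := hzne
          have : 0 < z.2.1.length := List.length_pos_iff.mpr h2
          omega
        have hany1 : (st.map pvSigma).any (fun x => !x.1.isEmpty) = true := by
          rw [List.any_map, List.any_eq_true]
          exact ⟨z, hz, by simp [Function.comp, pvSigma, pvUntok_nil, hbs z hz, hzne]⟩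
        have hany2 : (st.map pvSigma).any (fun x => !x.1.isEmpty && (x.1.headD ' ').isLower)
            = true := by
          rw [List.any_map, List.any_eq_true]
          refine ⟨z, hz, ?_⟩
          obtain ⟨c, t', hct⟩ := List.exists_cons_of_ne_nil hzne
          have hc : c.isLower = true := (hgood z hz).2 c (by rw [hct]; exact List.mem_cons_self ..)
          simp [Function.comp, pvSigma, pvUntok_nil, hbs z hz, hct, hc]
        rw [pvSLoop, hany1, hany2]
        simp only [if_true]
        have hcomm : (st.map pvSigma).map pvSInsStep = (st.map pvColT).map pvSigma := by
          rw [List.map_map, List.map_map]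
          exact List.map_congr_left (fun x hx => by
            simp only [Function.comp]
            exact pvSigT x (hbs x hx) ((hgood x hx).2))
        rw [hcomm]
        rw [ih (st.map pvColT) 0
          (by simp [hst])
          (fun x hx => by
            obtain ⟨x', hx', rfl⟩ := List.mem_map.mp hx
            simp [pvColT, hbs x' hx'])
          (fun x hx => by
            obtain ⟨x', hx', rfl⟩ := List.mem_map.mp hx
            have := hgood x' hx'
            exact ⟨fun p hp => this.1 p (by simpa [pvColT] using hp),
              fun c hc => this.2 c (List.mem_of_mem_tail (by simpa [pvColT] using hc))⟩)
          (by
            rw [List.map_map]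
            have hlt : ((st.map fun x => (pvUntok (pvColT x).1 (pvColT x).2.1).length).sum
                < (st.map fun x => (pvUntok x.1 x.2.1).length).sum) := by
              apply List.sum_lt_sum
              · intro x hx
                simp [pvColT, pvUntok_nil, hbs x hx, List.length_tail]
              · refine ⟨z, hz, ?_⟩
                have : 0 < z.2.1.length := List.length_pos_iff.mpr hzne
                simp only [pvColT, pvUntok_nil, hbs z hz, List.length_tail]
                omega
            have he : ((fun x => (pvUntok x.1 x.2.1).length) ∘ pvColT)
                = (fun x => (pvUntok (pvColT x).1 (pvColT x).2.1).length) := rfl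
            rw [he]
            omega)]
        congr 1
        rw [List.map_map]
        apply List.map_congr_left
        intro x hx
        have hW' : pvSlotWidths ((st.map pvColT).map pvTProj)
            = [st.foldl (fun a x => max a x.2.1.length) 0 - 1] := by
          rw [List.map_map]
          have hco : (pvTProj ∘ pvColT) = fun x : List (List Char × Char) × List Char × List Char =>
              (x.1, x.2.1.tail) := by
            funext x; simp [pvTProj, pvColT]
          have hcy : (pvTProj ∘ pvColT) y = ([], y.2.1.tail) := by
            simp [pvTProj, pvColT, hy1]
          rw [hst, List.map_cons, hcy, pvSlotWidths]
          congr 1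
          rw [← hcy, ← List.map_cons, ← hst, hco, List.foldl_map]
          have := pvFoldlMax_dec (fun x : List (List Char × Char) × List Char × List Char => x.2.1.length)
            (fun x => x.2.1.tail.length) st (fun x _ => by simp [List.length_tail]) 0
          simpa using this
        simp only [Function.comp, hW, hW', pvColT, hbs x hx]
        rw [pvRender, pvRender]
        simp only [List.headD_cons]
        rw [pvLjust_step x.2.1 _ hwpos]
        simp [List.append_assoc]
    | succ M' =>
      have hbs : ∀ x ∈ st, x.1 ≠ [] := fun x hx => by
        have := hlen x hx; intro h; rw [h] at this; simp at this
      -- widths of the current state: head slot + rest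
      have hW : pvSlotWidths (st.map pvTProj)
          = (st.foldl (fun a x => max a (x.1.headD ([], ' ')).1.length) 0)
            :: pvSlotWidths (st.map (fun x => (x.1.tail, x.2.1))) := by
        obtain ⟨p, bs', hybs⟩ :=
          List.exists_cons_of_ne_nil (hbs y (by rw [hst]; exact List.mem_cons_self ..))
        have hty : pvTProj y = (p :: bs', y.2.1) := by simp [pvTProj, hybs]
        rw [hst, List.map_cons, hty, pvSlotWidths]
        congr 1
        · rw [← hty, ← List.map_cons, List.foldl_map]; rfl
        · rw [← hty, ← List.map_cons, List.map_map]; rfl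
      have hymem : y ∈ st := by rw [hst]; exact List.mem_cons_self ..
      obtain ⟨py, bsy, hybs⟩ := List.exists_cons_of_ne_nil (hbs y hymem)
      have hany1 : (st.map pvSigma).any (fun x => !x.1.isEmpty) = true := by
        rw [List.any_map, List.any_eq_true]
        refine ⟨y, hymem, ?_⟩
        rcases py with ⟨r0, m0⟩
        simp [Function.comp, pvSigma, hybs, pvUntok_cons]
      by_cases hrun : ∀ x ∈ st, (x.1.headD ([], ' ')).1 = []
      · -- aligned column
        have hwz : st.foldl (fun a x => max a (x.1.headD ([], ' ')).1.length) 0 = 0 :=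
          pvFoldlMax_zero _ _ (fun x hx => by rw [hrun x hx]; rfl)
        have hany2 : (st.map pvSigma).any
            (fun x => !x.1.isEmpty && (x.1.headD ' ').isLower) = false := by
          rw [List.any_map, List.any_eq_false]
          intro x hx
          obtain ⟨q, bs, hx1⟩ := List.exists_cons_of_ne_nil (hbs x hx)
          rcases q with ⟨r, m⟩
          have hr : r = [] := by have := hrun x hx; rw [hx1] at this; simpa using this
          subst hr
          have hm : m.isLower = false :=
            ((hgood x hx).1 ([], m) (by rw [hx1]; exact List.mem_cons_self ..)).2
          simp [Function.comp, pvSigma, hx1, pvUntok_cons, hm]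
        have hany3 : (st.map pvSigma).any (fun x => x.1.isEmpty) = false := by
          rw [List.any_map, List.any_eq_false]
          intro x hx
          obtain ⟨q, bs, hx1⟩ := List.exists_cons_of_ne_nil (hbs x hx)
          rcases q with ⟨r, m⟩
          simp [Function.comp, pvSigma, hx1, pvUntok_cons]
        rw [pvSLoop, hany1, hany2, hany3]
        simp only [if_true, Bool.false_eq_true, if_false]
        have hcomm : (st.map pvSigma).map pvSAliStep = (st.map pvColA).map pvSigma := by
          rw [List.map_map, List.map_map]
          exact List.map_congr_left (fun x hx => by
            simp only [Function.comp]
            exact pvSigA x (hbs x hx) (hrun x hx))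
        have hdec : ∀ x ∈ st,
            (pvUntok (pvColA x).1 (pvColA x).2.1).length < (pvUntok x.1 x.2.1).length := by
          intro x hx
          obtain ⟨q, bs, hx1⟩ := List.exists_cons_of_ne_nil (hbs x hx)
          rcases q with ⟨r, m⟩
          have hr : r = [] := by have := hrun x hx; rw [hx1] at this; simpa using this
          subst hr
          simp [pvColA, hx1, pvUntok_cons]
        rw [hcomm]
        rw [ih (st.map pvColA) M'
          (by simp [hst])
          (fun x hx => by
            obtain ⟨x', hx', rfl⟩ := List.mem_map.mp hx
            have := hlen x' hx'
            simp only [pvColA, List.length_tail, this]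
            omega)
          (fun x hx => by
            obtain ⟨x', hx', rfl⟩ := List.mem_map.mp hx
            have := hgood x' hx'
            exact ⟨fun p hp => this.1 p (List.mem_of_mem_tail (by simpa [pvColA] using hp)),
              fun c hc => this.2 c (by simpa [pvColA] using hc)⟩)
          (by
            rw [List.map_map]
            have he : ((fun x => (pvUntok x.1 x.2.1).length) ∘ pvColA)
                = (fun x => (pvUntok (pvColA x).1 (pvColA x).2.1).length) := rfl
            rw [he]
            have hlt := List.sum_lt_sum
              (fun x => (pvUntok (pvColA x).1 (pvColA x).2.1).length)
              (fun x => (pvUntok x.1 x.2.1).length)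
              (fun x hx => le_of_lt (hdec x hx)) ⟨y, hymem, hdec y hymem⟩
            omega)]
        congr 1
        rw [List.map_map]
        apply List.map_congr_left
        intro x hx
        have hW2 : pvSlotWidths ((st.map pvColA).map pvTProj)
            = pvSlotWidths (st.map (fun x => (x.1.tail, x.2.1))) := by
          rw [List.map_map]; rfl
        obtain ⟨q, bs, hx1⟩ := List.exists_cons_of_ne_nil (hbs x hx)
        rcases q with ⟨r, m⟩
        have hr : r = [] := by have := hrun x hx; rw [hx1] at this; simpa using this
        subst hr
        simp only [Function.comp, hW, hW2, hwz, pvColA, hx1]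
        rw [pvRender_ali_step]
        simp [List.append_assoc]
      · -- insertion column on the match-slot insert runs
        push_neg at hrun
        obtain ⟨z, hz, hzr⟩ := hrun
        have hwpos : 0 < st.foldl (fun a x => max a (x.1.headD ([], ' ')).1.length) 0 := by
          have h1 := pvFoldlMax_mem_le
            (fun x : List (List Char × Char) × List Char × List Char =>
              (x.1.headD ([], ' ')).1.length) st z hz 0
          have h2 : 0 < (z.1.headD ([], ' ')).1.length := List.length_pos_iff.mpr hzr
          omega
        have hany2 : (st.map pvSigma).any
            (fun x => !x.1.isEmpty && (x.1.headD ' ').isLower) = true := by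
          rw [List.any_map, List.any_eq_true]
          refine ⟨z, hz, ?_⟩
          obtain ⟨q, bs, hz1⟩ := List.exists_cons_of_ne_nil (hbs z hz)
          rcases q with ⟨r, m⟩
          obtain ⟨c, r', hr⟩ : ∃ c r', r = c :: r' := by
            rw [hz1] at hzr
            simp only [List.headD_cons] at hzr
            exact List.exists_cons_of_ne_nil hzr
          have hc : c.isLower = true :=
            ((hgood z hz).1 (r, m) (by rw [hz1]; exact List.mem_cons_self ..)).1 c
              (by rw [hr]; exact List.mem_cons_self ..)
          simp [Function.comp, pvSigma, hz1, pvUntok_cons, hr, hc]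
        rw [pvSLoop, hany1, hany2]
        simp only [if_true]
        have hcomm : (st.map pvSigma).map pvSInsStep = (st.map pvColR).map pvSigma := by
          rw [List.map_map, List.map_map]
          exact List.map_congr_left (fun x hx => by
            simp only [Function.comp]
            exact pvSigR x (hbs x hx) (hgood x hx))
        have hdec : ∀ x ∈ st,
            (pvUntok (pvColR x).1 (pvColR x).2.1).length ≤ (pvUntok x.1 x.2.1).length := by
          intro x hx
          obtain ⟨q, bs, hx1⟩ := List.exists_cons_of_ne_nil (hbs x hx)
          rcases q with ⟨r, m⟩
          simp only [pvColR, hx1, pvUntok_cons]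
          simp [List.length_tail]
        rw [hcomm]
        rw [ih (st.map pvColR) (M' + 1)
          (by simp [hst])
          (fun x hx => by
            obtain ⟨x', hx', rfl⟩ := List.mem_map.mp hx
            obtain ⟨q, bs, hx1⟩ := List.exists_cons_of_ne_nil (hbs x' hx')
            rcases q with ⟨r, m⟩
            have := hlen x' hx'
            rw [hx1] at this
            simpa [pvColR, hx1] using this)
          (fun x hx => by
            obtain ⟨x', hx', rfl⟩ := List.mem_map.mp hx
            obtain ⟨hg1, hg2⟩ := hgood x' hx'
            obtain ⟨q, bs, hx1⟩ := List.exists_cons_of_ne_nil (hbs x' hx')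
            rcases q with ⟨r, m⟩
            constructor
            · intro p hp
              simp only [pvColR, hx1] at hp
              rcases List.mem_cons.mp hp with rfl | hp'
              · have := hg1 (r, m) (by rw [hx1]; exact List.mem_cons_self ..)
                exact ⟨fun c hc => this.1 c (List.mem_of_mem_tail hc), this.2⟩
              · exact hg1 p (by rw [hx1]; exact List.mem_cons_of_mem _ hp')
            · intro c hc
              exact hg2 c (by simpa [pvColR] using hc))
          (by
            rw [List.map_map]
            have he : ((fun x => (pvUntok x.1 x.2.1).length) ∘ pvColR)
                = (fun x => (pvUntok (pvColR x).1 (pvColR x).2.1).length) := rfl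
            rw [he]
            have hzdec : (pvUntok (pvColR z).1 (pvColR z).2.1).length
                < (pvUntok z.1 z.2.1).length := by
              obtain ⟨q, bs, hz1⟩ := List.exists_cons_of_ne_nil (hbs z hz)
              rcases q with ⟨r, m⟩
              have hrne : r ≠ [] := by
                rw [hz1] at hzr; simpa using hzr
              have : 0 < r.length := List.length_pos_iff.mpr hrne
              simp only [pvColR, hz1, pvUntok_cons]
              simp [List.length_tail]
              omega
            have hlt := List.sum_lt_sum
              (fun x => (pvUntok (pvColR x).1 (pvColR x).2.1).length)
              (fun x => (pvUntok x.1 x.2.1).length)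
              hdec ⟨z, hz, hzdec⟩
            omega)]
        congr 1
        rw [List.map_map]
        have hW3 : pvSlotWidths ((st.map pvColR).map pvTProj)
            = (st.foldl (fun a x => max a (x.1.headD ([], ' ')).1.length) 0 - 1)
              :: pvSlotWidths (st.map (fun x => (x.1.tail, x.2.1))) := by
          rw [List.map_map]
          rcases py with ⟨ry, my⟩
          have hcy : (pvTProj ∘ pvColR) y = ((ry.tail, my) :: bsy, y.2.1) := by
            simp [pvTProj, pvColR, hybs]
          rw [hst, List.map_cons, hcy, pvSlotWidths]
          congr 1
          · rw [← hcy, ← List.map_cons, ← hst, List.foldl_map]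
            have hcongr : st.foldl
                (fun a x => max a (((pvTProj ∘ pvColR) x).1.headD ([], ' ')).1.length) 0
                = st.foldl (fun a x => max a ((x.1.headD ([], ' ')).1.length - 1)) 0 := by
              apply PySem.List.foldl_congr_mem
              intro a x hx
              obtain ⟨q, bs, hx1⟩ := List.exists_cons_of_ne_nil (hbs x hx)
              rcases q with ⟨r, m⟩
              simp [Function.comp, pvTProj, pvColR, hx1, List.length_tail]
            rw [hcongr]
            have := pvFoldlMax_dec
              (fun x : List (List Char × Char) × List Char × List Char =>
                (x.1.headD ([], ' ')).1.length)
              (fun x => (x.1.headD ([], ' ')).1.length - 1) st (fun x _ => rfl) 0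
            simpa using this
          · rw [← hcy, ← List.map_cons, ← hst, List.map_map]
            congr 1
            apply List.map_congr_left
            intro x hx
            obtain ⟨q, bs, hx1⟩ := List.exists_cons_of_ne_nil (hbs x hx)
            rcases q with ⟨r, m⟩
            simp [Function.comp, pvTProj, pvColR, hx1]
        apply List.map_congr_left
        intro x hx
        obtain ⟨q, bs, hx1⟩ := List.exists_cons_of_ne_nil (hbs x hx)
        rcases q with ⟨r, m⟩
        simp only [Function.comp, hW, hW3, pvColR, hx1]
        rw [pvRender, pvRender]
        simp only [List.headD_cons, List.tail_cons]
        rw [pvLjust_step r _ hwpos]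
        simp [List.append_assoc]

theorem pvMain (l : List String)
    (hpre : ∀ s ∈ l, ∀ t ∈ l, pvMatchCount s = pvMatchCount t) :
    convert_a3m_to_stockholm_cpp l = convert_a3m_to_stockholm_cpp_alt l := by
  cases l with
  | nil => rfl
  | cons s0 ls =>
    set l := s0 :: ls with hl
    set st : List (List (List Char × Char) × List Char × List Char)
      := l.map (fun s => ((pvTokR s.toList).1, (pvTokR s.toList).2, ([] : List Char))) with hstdef
    set M := (pvTokR s0.toList).1.length with hM
    have hlen : ∀ x ∈ st, x.1.length = M := by
      intro x hx
      obtain ⟨s, hs, rfl⟩ := List.mem_map.mp hx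
      simp only
      rw [pvTokR_len, hM, pvTokR_len]
      exact hpre s hs s0 (by rw [hl]; exact List.mem_cons_self ..)
    have hgood : ∀ x ∈ st, pvGoodRow x := by
      intro x hx
      obtain ⟨s, hs, rfl⟩ := List.mem_map.mp hx
      exact pvTokR_good s.toList []
    have hsum : (st.map (fun x => (pvUntok x.1 x.2.1).length)).sum
        = ((l.map (fun s => s.toList)).map List.length).sum := by
      rw [hstdef, List.map_map, List.map_map]
      congr 1
      apply List.map_congr_left
      intro s _
      simp [Function.comp, pvUntok_tokR]
    have hsig : st.map pvSigma = ((l.map (fun s => s.toList)).map (fun s => (s, 0, ([] : List Char)))).map pvPhi := by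
      rw [hstdef, List.map_map, List.map_map, List.map_map]
      apply List.map_congr_left
      intro s _
      simp [Function.comp, pvSigma, pvPhi, pvUntok_tokR]
    have hkey := pvKey (((l.map (fun s => s.toList)).map List.length).sum + 1) st M
      (by rw [hstdef]; simp [hl])
      hlen hgood (by rw [hsum]; omega)
    rw [hsig] at hkey
    -- A side
    rw [convert_a3m_to_stockholm_cpp]
    simp only [List.isEmpty_cons, Bool.false_eq_true, if_false]
    rw [pvALoop_eq_sloop, hkey]
    -- B side
    rw [convert_a3m_to_stockholm_cpp_alt]
    have htoks : l.map (fun s => pvTokenize s.toList) = st.map pvTProj := by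
      rw [hstdef, List.map_map]
      apply List.map_congr_left
      intro s _
      simp [Function.comp, pvTokenize_eq_tokR, pvTProj]
    simp only [htoks]
    have hhead : ((st.map pvTProj).headD ([], [])).1.length = M := by
      rw [hstdef, hl]
      simp [pvTProj]
      rw [hM]
    have hall : (st.map pvTProj).all (fun x => x.1.length == ((st.map pvTProj).headD ([], [])).1.length) = true := by
      rw [List.all_eq_true]
      intro x hx
      obtain ⟨x', hx', rfl⟩ := List.mem_map.mp hx
      rw [hhead]
      simp only [pvTProj, beq_iff_eq]
      exact hlen x' hx'
    rw [hall]
    simp only [if_true, List.map_map, List.map_map]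
    apply List.map_congr_left
    intro x hx
    obtain ⟨s, hs, rfl⟩ := List.mem_map.mp hx
    simp [Function.comp, pvTProj]
    simp [hl]

-- ===== VERDICT (by name: the statement is the Claim_ definition above) =====
theorem convert_a3m_to_stockholm_cpp_spec : Claim_equal_convert_a3m_to_stockholm_cpp := by
  intro a3m_sequences _ hpre
  unfold Spec_convert_a3m_to_stockholm_cpp
  exact pvMain a3m_sequences hpre
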